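-- pv_equiv track=rewrite | github.com/Ecogenomics/curatomatic | curatomatic/util/tree.py | check_for_candidate_sharing
-- ===== SOURCE A (Python) =====
-- def check_for_candidate_sharing(d_taxon_to_candidates):
--     out = dict()
--     ranks = ['p', 'c', 'o', 'f', 'g', 's']
--     for rank in ranks:
--         seen = set()
--         shared = set()
--
--         for taxon, node_lst in d_taxon_to_candidates.items():
--             if taxon[0] != rank:
--                 continue
--
--             node_set = set(node_lst)
--             common = seen.intersection(node_set)
--             if len(common) > 0:
--                 shared.update(common)
--             seen.update(node_lst)
--
--         for taxon, node_lst in d_taxon_to_candidates.items():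
--             if taxon[0] != rank:
--                 continue
--
--             node_set = set(node_lst)
--             common = shared.intersection(node_set)
--             if len(common) > 0:
--                 out[taxon] = common
--     return out
-- ===== SOURCE B (Python) =====
-- def check_for_candidate_sharing(d_taxon_to_candidates):
--     ranks = ['p', 'c', 'o', 'f', 'g', 's']
--     # one grouping pass: rank letter -> taxa of that rank, in insertion order
--     groups = {r: [] for r in ranks}
--     for taxon, node_lst in d_taxon_to_candidates.items():
--         r = taxon[0]
--         if r in groups:
--             groups[r].append((taxon, node_lst))
--     out = dict()
--     for rank in ranks:
--         group = groups[rank]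
--         # frequency table: in how many taxa of this rank does each node occur?
--         counts = dict()
--         for taxon, node_lst in group:
--             for n in dict.fromkeys(node_lst):
--                 counts[n] = counts.get(n, 0) + 1
--         shared = [n for n, c in counts.items() if c >= 2]
--         for taxon, node_lst in group:
--             common = {n for n in dict.fromkeys(node_lst) if n in shared}
--             if common:
--                 out[taxon] = common
--     return out
-- ===== Notes on version B (the rewrite author's own statement) =====
-- stated objective: alternative
-- what changed: A rescans the whole dict twice per rank with running seen/shared sets; B makes one grouping pass (rank letter -> taxa), then per rank builds a node-frequency table over deduplicated per-taxon node lists and reads 'shared' off as the nodes counted at least twice.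
import Mathlib
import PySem

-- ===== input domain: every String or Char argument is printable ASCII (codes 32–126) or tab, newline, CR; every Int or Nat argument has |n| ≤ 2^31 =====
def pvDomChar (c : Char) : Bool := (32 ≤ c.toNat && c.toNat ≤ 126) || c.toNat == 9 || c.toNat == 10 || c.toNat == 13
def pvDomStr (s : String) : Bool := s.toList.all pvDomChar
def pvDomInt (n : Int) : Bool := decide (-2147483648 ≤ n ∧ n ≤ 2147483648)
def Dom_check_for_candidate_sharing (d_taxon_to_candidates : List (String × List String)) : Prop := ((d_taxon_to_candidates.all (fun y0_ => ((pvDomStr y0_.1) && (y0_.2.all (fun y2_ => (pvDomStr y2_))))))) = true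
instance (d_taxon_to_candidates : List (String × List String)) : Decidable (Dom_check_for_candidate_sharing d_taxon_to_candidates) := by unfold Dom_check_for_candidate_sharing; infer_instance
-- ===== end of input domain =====

-- B replaces A's six full rescans of the dict (two per rank, with running seen/shared sets) by one
-- grouping pass plus, per rank, a frequency table from which 'shared' is read off (objective: alternative
-- decomposition). Equivalence is about the returned value (A mutates nothing).

-- ===== PORT A =====
-- Python's 'taxon[0]' (IndexError on a zero-length taxon, excluded by Pre_) is PySem.List.pyGet? taxon.toList 0;
-- Python's set iteration order is not modelled: each set stored in 'out' is represented in
-- first-occurrence-in-node_lst order (the result is compared as a set).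

-- first inner loop of a rank: state (seen, shared)
def pvA_pass1 (d_taxon_to_candidates : List (String × List String)) (rank : Char) :
    PySem.Set String × PySem.Set String :=
  d_taxon_to_candidates.foldl
    (fun st p =>
      if PySem.List.pyGet? p.1.toList 0 == some rank then
        let node_set := PySem.Set.ofList p.2
        let common := PySem.Set.inter st.1 node_set
        let shared := if 0 < common.length then PySem.Set.update st.2 common else st.2
        (PySem.Set.update st.1 p.2, shared)
      else st)
    (PySem.Set.empty, PySem.Set.empty)

-- second inner loop of a rank: fills 'out'
def pvA_pass2 (d_taxon_to_candidates : List (String × List String)) (rank : Char)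
    (shared : PySem.Set String) (out : PySem.Dict String (List String)) :
    PySem.Dict String (List String) :=
  d_taxon_to_candidates.foldl
    (fun out p =>
      if PySem.List.pyGet? p.1.toList 0 == some rank then
        let node_set := PySem.Set.ofList p.2
        let common := PySem.Set.inter node_set shared  -- canonical (node_set-order) representative of the set
        if 0 < common.length then out.insert p.1 common else out
      else out)
    out

def check_for_candidate_sharing (d_taxon_to_candidates : List (String × List String)) :
    List (String × List String) :=
  ((['p', 'c', 'o', 'f', 'g', 's'] : List Char).foldl
    (fun out rank => pvA_pass2 d_taxon_to_candidates rank (pvA_pass1 d_taxon_to_candidates rank).2 out)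
    PySem.Dict.empty).items

-- ===== PORT B =====
-- groups = {r: [] for r in ranks}; then one pass appending each taxon to its rank's group
def pvB_groups (d_taxon_to_candidates : List (String × List String)) :
    PySem.Dict Char (List (String × List String)) :=
  d_taxon_to_candidates.foldl
    (fun g p =>
      match PySem.List.pyGet? p.1.toList 0 with   -- taxon[0]; none = IndexError, excluded by Pre_
      | none => g
      | some r => if g.contains r then g.modify r [] (· ++ [p]) else g)
    ((['p', 'c', 'o', 'f', 'g', 's'] : List Char).foldl (fun g r => g.insert r []) PySem.Dict.empty)

-- counts[n] = counts.get(n, 0) + 1 over dict.fromkeys(node_lst) (= PySem.List.dedup) of each group member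
def pvB_counts (group : List (String × List String)) : PySem.Dict String Int :=
  group.foldl
    (fun counts p =>
      (PySem.List.dedup p.2).foldl (fun counts n => counts.insert n (counts.getD n 0 + 1)) counts)
    PySem.Dict.empty

def check_for_candidate_sharing_alt (d_taxon_to_candidates : List (String × List String)) :
    List (String × List String) :=
  let groups := pvB_groups d_taxon_to_candidates
  ((['p', 'c', 'o', 'f', 'g', 's'] : List Char).foldl
    (fun out rank =>
      let group := groups.getD rank []
      let counts := pvB_counts group
      let shared := (counts.items.filter (fun q => 2 ≤ q.2)).map (·.1)
      group.foldl
        (fun out p =>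
          -- set comprehension over the deduped list: Set.ofList of the filtered list
          let common : PySem.Set String :=
            PySem.Set.ofList ((PySem.List.dedup p.2).filter (fun n => shared.contains n))
          if 0 < common.length then out.insert p.1 common else out)
        out)
    PySem.Dict.empty).items

-- ===== PRECONDITION & SPEC =====
-- Pre_ excludes exactly the inputs having a zero-length taxon key string, on which Python's taxon[0] raises IndexError.
def Pre_check_for_candidate_sharing (d_taxon_to_candidates : List (String × List String)) : Prop :=
  ∀ p ∈ d_taxon_to_candidates, p.1.toList ≠ []
instance (d_taxon_to_candidates : List (String × List String)) : Decidable (Pre_check_for_candidate_sharing d_taxon_to_candidates) := by unfold Pre_check_for_candidate_sharing; infer_instance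

def pvWitness_check_for_candidate_sharing : (List (String × List String)) :=
  [("p1", ["a", "b"]), ("p2", ["b"]), ("g1", ["a"]), ("x1", ["a", "a"])]

def Spec_check_for_candidate_sharing (d_taxon_to_candidates : List (String × List String)) (out : List (String × List String)) : Prop := out = check_for_candidate_sharing_alt d_taxon_to_candidates
instance (d_taxon_to_candidates : List (String × List String)) (out : List (String × List String)) : Decidable (Spec_check_for_candidate_sharing d_taxon_to_candidates out) := by unfold Spec_check_for_candidate_sharing; infer_instance

-- ===== CLAIM (what is proved, stated in full; the proofs are below) =====
def Claim_equal_check_for_candidate_sharing : Prop := ∀ (d_taxon_to_candidates : List (String × List String)), Dom_check_for_candidate_sharing d_taxon_to_candidates → Pre_check_for_candidate_sharing d_taxon_to_candidates → Spec_check_for_candidate_sharing d_taxon_to_candidates (check_for_candidate_sharing d_taxon_to_candidates)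


-- ===== LEMMAS AND PROOFS =====

-- count of x in dict.fromkeys(xs): 1 if x occurs, else 0
theorem pv_dedup_count {x : String} (xs : List String) :
    (PySem.List.dedup xs).count x = if x ∈ xs then 1 else 0 := by
  rw [PySem.List.dedup_eq_ofList]
  by_cases h : x ∈ xs
  · rw [if_pos h]
    exact List.count_eq_one_of_mem (PySem.Set.nodup_ofList xs) ((PySem.Set.mem_ofList xs x).2 h)
  · simp [h, List.count_eq_zero_of_not_mem (fun hm => h ((PySem.Set.mem_ofList xs x).1 hm))]

-- B's frequency table reads off the number of taxa of the group containing x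
theorem pv_counts_getD (g : List (String × List String)) (c : PySem.Dict String Int) (x : String) :
    (g.foldl (fun counts p =>
        (PySem.List.dedup p.2).foldl (fun counts n => counts.insert n (counts.getD n 0 + 1)) counts) c).getD x 0
      = c.getD x 0 + (g.countP (fun p => decide (x ∈ p.2)) : Int) := by
  induction g generalizing c with
  | nil => simp
  | cons p g ih =>
      rw [List.foldl_cons, ih, PySem.Dict.getD_foldl_insert_add_one, pv_dedup_count, List.countP_cons]
      by_cases h : x ∈ p.2
      · simp [h]; omega
      · simp [h]

theorem pv_counts_keys_nodup (g : List (String × List String)) (c : PySem.Dict String Int)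
    (h : c.keys.Nodup) :
    (g.foldl (fun counts p =>
        (PySem.List.dedup p.2).foldl (fun counts n => counts.insert n (counts.getD n 0 + 1)) counts) c).keys.Nodup := by
  induction g generalizing c with
  | nil => exact h
  | cons p g ih =>
      exact ih _ (PySem.Dict.nodup_keys_foldl_insert _ _ _ h)

-- membership in B's 'shared' list is exactly count ≥ 2
theorem pv_shared_mem (cts : PySem.Dict String Int) (h : cts.keys.Nodup) (x : String) :
    (x ∈ (cts.items.filter (fun q => 2 ≤ q.2)).map (·.1)) ↔ 2 ≤ cts.getD x 0 := by
  constructor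
  · rintro hm
    obtain ⟨q, hq, rfl⟩ := List.mem_map.1 hm
    obtain ⟨hqi, hq2⟩ := List.mem_filter.1 hq
    rcases q with ⟨k, v⟩
    rw [PySem.Dict.getD_of_mem_items cts hqi h]
    exact of_decide_eq_true hq2
  · intro h2
    by_cases hc : cts.contains x
    · have hiso : (cts.get? x).isSome := by rw [← PySem.Dict.contains_eq_isSome_get?]; exact hc
      obtain ⟨v, hv⟩ := Option.isSome_iff_exists.1 hiso
      have hitem := PySem.Dict.mem_items_of_get?_eq_some cts hv
      have hg : cts.getD x 0 = v := PySem.Dict.getD_of_get?_eq_some cts 0 hv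
      refine List.mem_map.2 ⟨(x, v), List.mem_filter.2 ⟨hitem, ?_⟩, rfl⟩
      simp only [decide_eq_true_eq]
      rw [hg] at h2; exact h2
    · rw [PySem.Dict.getD_of_not_contains cts 0 (by simpa using hc)] at h2
      omega

-- the invariant of A's first pass: x ends in 'shared' iff ≥2 taxa of the group contain it
theorem pv_pass1_mem (g : List (String × List String)) (seen shared : PySem.Set String) (x : String) :
    (x ∈ (g.foldl (fun st (p : String × List String) =>
        (PySem.Set.update st.1 p.2,
         if 0 < (PySem.Set.inter st.1 (PySem.Set.ofList p.2)).length then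
           PySem.Set.update st.2 (PySem.Set.inter st.1 (PySem.Set.ofList p.2))
         else st.2)) (seen, shared)).2)
      ↔ x ∈ shared ∨ (x ∈ seen ∧ 1 ≤ g.countP (fun p => decide (x ∈ p.2)))
          ∨ 2 ≤ g.countP (fun p => decide (x ∈ p.2)) := by
  induction g generalizing seen shared with
  | nil => simp
  | cons p g ih =>
      rw [List.foldl_cons, ih, List.countP_cons]
      have hcom : ∀ s : PySem.Set String,
          (x ∈ (if 0 < (PySem.Set.inter seen (PySem.Set.ofList p.2)).length then
              PySem.Set.update s (PySem.Set.inter seen (PySem.Set.ofList p.2)) else s))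
            ↔ x ∈ s ∨ (x ∈ seen ∧ x ∈ p.2) := by
        intro s
        split_ifs with hl
        · simp [PySem.Set.mem_update, PySem.Set.inter, List.mem_filter, PySem.Set.mem_ofList]
        · have : PySem.Set.inter seen (PySem.Set.ofList p.2) = [] := by
            cases hE : PySem.Set.inter seen (PySem.Set.ofList p.2) with
            | nil => rfl
            | cons a t => rw [hE] at hl; simp at hl
          constructor
          · intro hs; exact Or.inl hs
          · rintro (hs | ⟨h1, h2⟩)
            · exact hs
            · exfalso
              have hx : x ∈ PySem.Set.inter seen (PySem.Set.ofList p.2) := by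
                simp [PySem.Set.inter, List.mem_filter, PySem.Set.mem_ofList, h1, h2]
              rw [this] at hx
              simp at hx
      rw [hcom, PySem.Set.mem_update]
      set c := List.countP (fun p => decide (x ∈ p.2)) g with hc
      have e1 : (2 ≤ c + 1) ↔ (1 ≤ c) := by omega
      have e2 : (1 ≤ c + 1) := by omega
      have e4 : (1 ≤ c ∨ 2 ≤ c) ↔ 1 ≤ c := by omega
      by_cases hp : x ∈ p.2 <;> by_cases hs : x ∈ seen <;>
        simp [hp, hs, e1, e2, e4]



-- B's grouping pass, read back at a rank letter, is the filter A's guard performs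
theorem pv_groups_getD (d : List (String × List String))
    (g0 : PySem.Dict Char (List (String × List String)))
    (hk : ∀ c, g0.contains c = decide (c ∈ (['p', 'c', 'o', 'f', 'g', 's'] : List Char)))
    (r : Char) (hr : r ∈ (['p', 'c', 'o', 'f', 'g', 's'] : List Char)) :
    (d.foldl (fun g p =>
        match PySem.List.pyGet? p.1.toList 0 with
        | none => g
        | some c => if g.contains c then g.modify c [] (· ++ [p]) else g) g0).getD r []
      = g0.getD r [] ++ d.filter (fun p => PySem.List.pyGet? p.1.toList 0 == some r) := by
  induction d generalizing g0 with
  | nil => simp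
  | cons p d ih =>
      rw [List.foldl_cons, List.filter_cons]
      cases hE : PySem.List.pyGet? p.1.toList 0 with
      | none => rw [ih g0 hk]; simp
      | some c =>
          simp only [hk c]
          by_cases hcr : c ∈ (['p', 'c', 'o', 'f', 'g', 's'] : List Char)
          · simp only [hcr, decide_true, if_true]
            rw [ih _ (fun c' => by
              rw [PySem.Dict.contains_modify, hk c']
              by_cases h : c' = c
              · subst h; simp [hcr]
              · simp [h])]
            rw [PySem.Dict.getD_modify]
            by_cases hrc : r = c
            · subst hrc; simp
            · have : (some c == some r) = false := by
                simp only [beq_eq_false_iff_ne, ne_eq, Option.some.injEq]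
                exact fun h => hrc h.symm
              simp [hrc, this]
          · simp only [hcr, decide_false]
            rw [if_neg (by simp), ih g0 hk]
            have : (some c == some r) = false := by
              simp only [beq_eq_false_iff_ne, ne_eq, Option.some.injEq]
              intro h; exact hcr (h ▸ hr)
            simp [this]

-- the initial {r: [] for r in ranks} dict has exactly the rank letters as keys, each mapped to []
theorem pv_init_contains (c : Char) :
    ((['p', 'c', 'o', 'f', 'g', 's'] : List Char).foldl (fun g r => g.insert r []) (PySem.Dict.empty : PySem.Dict Char (List (String × List String)))).contains c
      = decide (c ∈ (['p', 'c', 'o', 'f', 'g', 's'] : List Char)) := by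
  simp only [List.foldl_cons, List.foldl_nil, PySem.Dict.contains_insert, PySem.Dict.contains_empty]
  rw [Bool.eq_iff_iff]
  simp [beq_iff_eq]
  tauto

theorem pv_init_getD (r : Char) :
    ((['p', 'c', 'o', 'f', 'g', 's'] : List Char).foldl (fun g r => g.insert r []) (PySem.Dict.empty : PySem.Dict Char (List (String × List String)))).getD r [] = [] := by
  by_cases h : r ∈ (['p', 'c', 'o', 'f', 'g', 's'] : List Char)
  · fin_cases h <;> rfl
  · exact PySem.Dict.getD_of_not_contains _ _ (by rw [pv_init_contains]; simpa using h)

-- A's shared set of a rank: membership iff ≥ 2 taxa of the rank's group contain the node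
theorem pv_sharedA_mem (d : List (String × List String)) (r : Char) (x : String) :
    x ∈ (pvA_pass1 d r).2
      ↔ 2 ≤ (d.filter (fun p => PySem.List.pyGet? p.1.toList 0 == some r)).countP
              (fun p => decide (x ∈ p.2)) := by
  unfold pvA_pass1
  rw [PySem.List.foldl_if_eq_foldl_filter (fun p => PySem.List.pyGet? p.1.toList 0 == some r)
    (fun st (p : String × List String) =>
      (PySem.Set.update st.1 p.2,
       if 0 < (PySem.Set.inter st.1 (PySem.Set.ofList p.2)).length then
         PySem.Set.update st.2 (PySem.Set.inter st.1 (PySem.Set.ofList p.2))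
       else st.2))]
  rw [pv_pass1_mem]
  simp [PySem.Set.empty]

-- B's shared list of a rank: the same characterisation
theorem pv_sharedB_mem (g : List (String × List String)) (x : String) :
    x ∈ (((pvB_counts g).items.filter (fun q => 2 ≤ q.2)).map (·.1))
      ↔ 2 ≤ g.countP (fun p => decide (x ∈ p.2)) := by
  have hn : (pvB_counts g).keys.Nodup := by
    unfold pvB_counts
    exact pv_counts_keys_nodup g PySem.Dict.empty PySem.Dict.nodup_keys_empty
  rw [pv_shared_mem _ hn]
  have hg : (pvB_counts g).getD x 0
      = (0 : Int) + (g.countP (fun p => decide (x ∈ p.2)) : Int) := by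
    unfold pvB_counts
    rw [pv_counts_getD]
    simp
  rw [hg]
  simp only [zero_add]
  exact_mod_cast Iff.rfl

-- the two per-taxon 'common' sets coincide (as lists, in node_lst first-occurrence order)
theorem pv_common_eq (p : String × List String) (sA : PySem.Set String) (sB : List String)
    (h : ∀ x, x ∈ sA ↔ x ∈ sB) :
    PySem.Set.inter (PySem.Set.ofList p.2) sA
      = PySem.Set.ofList ((PySem.List.dedup p.2).filter (fun n => sB.contains n)) := by
  rw [PySem.List.dedup_eq_ofList,
    PySem.Set.ofList_eq_self_of_nodup _ ((PySem.Set.nodup_ofList p.2).filter _)]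
  unfold PySem.Set.inter
  refine List.filter_congr ?_
  intro x _
  have : (sA.contains x = true) ↔ (sB.contains x = true) := by
    rw [PySem.Set.contains_iff]
    simp only [List.contains_iff_mem]
    exact h x
  exact Bool.coe_iff_coe.1 this

-- ===== VERDICT (by name: the statement is the Claim_ definition above) =====
-- proof-side abbreviations for the zeta-reduced loop bodies of the two ports
def pvPred (r : Char) (p : String × List String) : Bool :=
  PySem.List.pyGet? p.1.toList 0 == some r

def pvA_step2 (s : PySem.Set String) (out : PySem.Dict String (List String))
    (p : String × List String) : PySem.Dict String (List String) :=
  if 0 < (PySem.Set.inter (PySem.Set.ofList p.2) s).length then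
    out.insert p.1 (PySem.Set.inter (PySem.Set.ofList p.2) s)
  else out

def pvB_shared (g : List (String × List String)) : List String :=
  ((pvB_counts g).items.filter (fun q => 2 ≤ q.2)).map (·.1)

def pvB_step (g : List (String × List String)) (out : PySem.Dict String (List String))
    (p : String × List String) : PySem.Dict String (List String) :=
  if 0 < (PySem.Set.ofList ((PySem.List.dedup p.2).filter (fun n => (pvB_shared g).contains n))).length then
    out.insert p.1 (PySem.Set.ofList ((PySem.List.dedup p.2).filter (fun n => (pvB_shared g).contains n)))
  else out

theorem pvA_bridge (d : List (String × List String)) :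
    check_for_candidate_sharing d
      = ((['p', 'c', 'o', 'f', 'g', 's'] : List Char).foldl
          (fun out r => d.foldl
            (fun out p => if pvPred r p then pvA_step2 (pvA_pass1 d r).2 out p else out) out)
          PySem.Dict.empty).items := rfl

theorem pvB_bridge (d : List (String × List String)) :
    check_for_candidate_sharing_alt d
      = ((['p', 'c', 'o', 'f', 'g', 's'] : List Char).foldl
          (fun out r => ((pvB_groups d).getD r []).foldl
            (pvB_step ((pvB_groups d).getD r [])) out)
          PySem.Dict.empty).items := rfl

theorem check_for_candidate_sharing_spec : Claim_equal_check_for_candidate_sharing := by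
  intro d _ _
  unfold Spec_check_for_candidate_sharing
  rw [pvA_bridge, pvB_bridge]
  refine congrArg PySem.Dict.items ?_
  refine PySem.List.foldl_congr_mem _ _ _ _ ?_
  intro out r hr
  have hgrp : (pvB_groups d).getD r [] = d.filter (pvPred r) := by
    unfold pvB_groups
    rw [pv_groups_getD d _ pv_init_contains r hr, pv_init_getD]
    rfl
  rw [hgrp, PySem.List.foldl_if_eq_foldl_filter (pvPred r) (pvA_step2 (pvA_pass1 d r).2)]
  refine PySem.List.foldl_congr_mem _ _ _ _ ?_
  intro acc p _
  have hcom := pv_common_eq p (pvA_pass1 d r).2 (pvB_shared (d.filter (pvPred r)))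
    (fun x => by
      rw [pv_sharedA_mem]
      unfold pvB_shared
      rw [pv_sharedB_mem]
      rfl)
  unfold pvA_step2 pvB_step
  rw [hcom]
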